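-- pv_equiv track=rewrite | github.com/bouthilx/compute-forecast-framework | package/find_venue_duplicates.py | analyze_known_patterns
-- ===== SOURCE A (Python) =====
-- from collections import defaultdict, Counter
--
-- def analyze_known_patterns(venue_counts):
--     """Analyze specific known patterns like NeurIPS, ICML, etc."""
--
--     known_patterns = {
--         'neurips': ['neurips', 'neural information processing systems'],
--         'icml': ['icml', 'machine learning'],
--         'iclr': ['iclr', 'learning representations'],
--         'aaai': ['aaai', 'artificial intelligence'],
--         'ijcai': ['ijcai'],
--         'cvpr': ['cvpr', 'computer vision and pattern recognition'],
--         'iccv': ['iccv', 'computer vision'],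
--         'eccv': ['eccv', 'european conference on computer vision'],
--         'emnlp': ['emnlp', 'empirical methods'],
--         'acl': ['acl', 'computational linguistics'],
--         'naacl': ['naacl'],
--         'icra': ['icra', 'robotics and automation'],
--         'iros': ['iros', 'intelligent robots'],
--         'rss': ['rss', 'robotics science and systems']
--     }
--
--     pattern_groups = defaultdict(list)
--
--     for venue, data in venue_counts.items():
--         venue_lower = venue.lower()
--
--         for pattern_name, keywords in known_patterns.items():
--             if any(keyword in venue_lower for keyword in keywords):
--                 pattern_groups[pattern_name].append((venue, data))
--                 break
--
--     return pattern_groups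
-- ===== SOURCE B (Python) =====
-- from collections import defaultdict
--
-- _KNOWN_PATTERNS = {
--     'neurips': ['neurips', 'neural information processing systems'],
--     'icml': ['icml', 'machine learning'],
--     'iclr': ['iclr', 'learning representations'],
--     'aaai': ['aaai', 'artificial intelligence'],
--     'ijcai': ['ijcai'],
--     'cvpr': ['cvpr', 'computer vision and pattern recognition'],
--     'iccv': ['iccv', 'computer vision'],
--     'eccv': ['eccv', 'european conference on computer vision'],
--     'emnlp': ['emnlp', 'empirical methods'],
--     'acl': ['acl', 'computational linguistics'],
--     'naacl': ['naacl'],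
--     'icra': ['icra', 'robotics and automation'],
--     'iros': ['iros', 'intelligent robots'],
--     'rss': ['rss', 'robotics science and systems'],
-- }
--
--
-- def analyze_known_patterns(venue_counts):
--     """Analyze specific known patterns like NeurIPS, ICML, etc."""
--     # Stage 1: tag every venue with the highest-priority pattern matching it.
--     tagged = []
--     for venue, data in venue_counts.items():
--         venue_lower = venue.lower()
--         matches = [name for name, kws in _KNOWN_PATTERNS.items()
--                    if any(kw in venue_lower for kw in kws)]
--         if matches:
--             tagged.append((matches[0], (venue, data)))
--     # Stage 2: pattern names in order of first appearance.
--     names = list(dict.fromkeys(name for name, _ in tagged))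
--     # Stage 3: one filtering pass per name; no incremental accumulator dict.
--     groups = defaultdict(list)
--     for name in names:
--         groups[name] = [vd for t, vd in tagged if t == name]
--     return groups
-- ===== Notes on version B (the rewrite author's own statement) =====
-- stated objective: alternative
-- what changed: Replaces A's single pass that grows a defaultdict via per-venue pattern scan with break by three staged passes: a tagging pass collecting all matching patterns per venue and taking the first, an ordered dedup of tags via dict.fromkeys, and one filtering pass per tag that builds each group outright (no incremental accumulator).
import Mathlib
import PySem

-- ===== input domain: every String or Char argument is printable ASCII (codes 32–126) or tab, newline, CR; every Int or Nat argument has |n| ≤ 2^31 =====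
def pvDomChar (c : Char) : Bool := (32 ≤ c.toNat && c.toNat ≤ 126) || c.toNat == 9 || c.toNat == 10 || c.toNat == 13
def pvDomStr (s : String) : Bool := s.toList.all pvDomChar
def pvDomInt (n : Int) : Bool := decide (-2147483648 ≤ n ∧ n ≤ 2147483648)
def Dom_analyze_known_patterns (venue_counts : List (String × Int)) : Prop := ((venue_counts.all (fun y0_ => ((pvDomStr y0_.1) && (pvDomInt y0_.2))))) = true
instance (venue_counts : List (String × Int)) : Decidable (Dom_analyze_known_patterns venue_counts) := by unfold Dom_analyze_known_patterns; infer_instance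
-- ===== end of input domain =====

-- B replaces A's single pass growing a defaultdict (per-venue pattern scan with break)
-- by three staged passes: tag every venue with its first matching pattern, dedup the
-- tags in order of first appearance, then build each group by one filtering pass.

-- ===== PORT A =====
-- the known_patterns dict (a module-level constant in both Pythons; iterated in insertion order)
def pvPatterns : List (String × List String) :=
  [("neurips", ["neurips", "neural information processing systems"]),
   ("icml", ["icml", "machine learning"]),
   ("iclr", ["iclr", "learning representations"]),
   ("aaai", ["aaai", "artificial intelligence"]),
   ("ijcai", ["ijcai"]),
   ("cvpr", ["cvpr", "computer vision and pattern recognition"]),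
   ("iccv", ["iccv", "computer vision"]),
   ("eccv", ["eccv", "european conference on computer vision"]),
   ("emnlp", ["emnlp", "empirical methods"]),
   ("acl", ["acl", "computational linguistics"]),
   ("naacl", ["naacl"]),
   ("icra", ["icra", "robotics and automation"]),
   ("iros", ["iros", "intelligent robots"]),
   ("rss", ["rss", "robotics science and systems"])]

-- A's inner 'for pattern_name, keywords in known_patterns.items(): … break'
def pvInnerA (groups : PySem.Dict String (List (String × Int))) (venue_lower venue : String)
    (data : Int) : List (String × List String) → PySem.Dict String (List (String × Int))
  | [] => groups
  | (pattern_name, keywords) :: rest =>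
    if keywords.any (fun keyword => PySem.Str.isIn keyword venue_lower) then
      groups.modify pattern_name [] (· ++ [(venue, data)])   -- defaultdict(list)[k].append
    else pvInnerA groups venue_lower venue data rest

def analyze_known_patterns (venue_counts : List (String × Int)) : List (String × List (String × Int)) :=
  (venue_counts.foldl
    (fun pattern_groups vd =>
      pvInnerA pattern_groups (PySem.Str.lower vd.1) vd.1 vd.2 pvPatterns)
    PySem.Dict.empty).items

-- ===== PORT B =====
def analyze_known_patterns_alt (venue_counts : List (String × Int)) : List (String × List (String × Int)) :=
  -- Stage 1: matches = [name for name, kws if any(kw in venue_lower)]; keep (matches[0], (venue, data))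
  let tagged := venue_counts.filterMap (fun vd =>
    match (pvPatterns.filter (fun p =>
        p.2.any (fun kw => PySem.Str.isIn kw (PySem.Str.lower vd.1)))).map (fun p => p.1) with
    | [] => none
    | m :: _ => some (m, vd))
  -- Stage 2: names = list(dict.fromkeys(...))
  let names := PySem.List.dedup (tagged.map (fun t => t.1))
  -- Stage 3: groups[name] = [vd for t, vd in tagged if t == name]
  (names.foldl
    (fun groups name =>
      groups.insert name ((tagged.filter (fun t => t.1 == name)).map (fun t => t.2)))
    PySem.Dict.empty).items

-- ===== PRECONDITION & SPEC =====
def Spec_analyze_known_patterns (venue_counts : List (String × Int)) (out : List (String × List (String × Int))) : Prop := out = analyze_known_patterns_alt venue_counts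
instance (venue_counts : List (String × Int)) (out : List (String × List (String × Int))) : Decidable (Spec_analyze_known_patterns venue_counts out) := by unfold Spec_analyze_known_patterns; infer_instance

-- ===== CLAIM (what is proved, stated in full; the proofs are below) =====
def Claim_equal_analyze_known_patterns : Prop := ∀ (venue_counts : List (String × Int)), Dom_analyze_known_patterns venue_counts → Spec_analyze_known_patterns venue_counts (analyze_known_patterns venue_counts)

-- ===== LEMMAS AND PROOFS =====

-- B's tagging function, as a named helper for the proofs
def pvTag (vd : String × Int) : Option (String × (String × Int)) :=
  match (pvPatterns.filter (fun p =>
      p.2.any (fun kw => PySem.Str.isIn kw (PySem.Str.lower vd.1)))).map (fun p => p.1) with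
  | [] => none
  | m :: _ => some (m, vd)

-- A's inner break-loop equals "first name of the filtered pattern list, if any".
theorem pvInnerA_eq_filter_head (groups : PySem.Dict String (List (String × Int)))
    (vl venue : String) (data : Int) (ps : List (String × List String)) :
    pvInnerA groups vl venue data ps =
      match (ps.filter (fun p => p.2.any (fun kw => PySem.Str.isIn kw vl))).map (fun p => p.1) with
      | [] => groups
      | m :: _ => groups.modify m [] (· ++ [(venue, data)]) := by
  induction ps with
  | nil => simp [pvInnerA]
  | cons p rest ih =>
    obtain ⟨name, kws⟩ := p
    by_cases h : kws.any (fun keyword => PySem.Str.isIn keyword vl) = true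
    · simp only [pvInnerA, List.filter_cons, List.map_cons, h, if_true]
    · simp only [pvInnerA, if_neg h, ih, List.filter_cons]

-- A's venue fold equals the modify-append fold over B's tagged list.
theorem pvFoldA_eq_tagged (l : List (String × Int))
    (d : PySem.Dict String (List (String × Int))) :
    l.foldl (fun pattern_groups vd =>
        pvInnerA pattern_groups (PySem.Str.lower vd.1) vd.1 vd.2 pvPatterns) d =
      (l.filterMap pvTag).foldl (fun g p => g.modify p.1 [] (· ++ [p.2])) d := by
  induction l generalizing d with
  | nil => rfl
  | cons x rest ih =>
    simp only [List.foldl_cons, List.filterMap_cons]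
    rw [pvInnerA_eq_filter_head]
    unfold pvTag
    cases hm : (pvPatterns.filter (fun p =>
        p.2.any (fun kw => PySem.Str.isIn kw (PySem.Str.lower x.1)))).map (fun p => p.1) with
    | nil => exact ih d
    | cons m ms => simp only [List.foldl_cons]; exact ih _

-- ===== VERDICT (by name: the statement is the Claim_ definition above) =====
theorem analyze_known_patterns_spec : Claim_equal_analyze_known_patterns := by
  intro venue_counts _
  unfold Spec_analyze_known_patterns analyze_known_patterns analyze_known_patterns_alt
  rw [pvFoldA_eq_tagged]
  set L := venue_counts.filterMap pvTag with hL
  have hnd : ((L.foldl (fun g p => g.modify p.1 [] (· ++ [p.2])) PySem.Dict.empty).keys).Nodup := by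
    apply PySem.Dict.nodup_keys_foldl_modify_key L (fun p => p.1) [] (fun _ p => (· ++ [p.2]))
    simp [pysem]
  rw [PySem.Dict.items_eq_map_keys _ hnd []]
  rw [PySem.Dict.keys_foldl_modify_key]
  rw [PySem.Dict.items_foldl_insert_fresh]
  · simp only [PySem.Dict.keys_empty, PySem.Set.update_nil_left, PySem.List.dedup_eq_ofList,
      show (PySem.Dict.empty : PySem.Dict String (List (String × Int))).items = [] from rfl,
      List.nil_append]
    congr 1
    funext k
    rw [PySem.Dict.getD_foldl_modify_append]
    simp only [PySem.Dict.getD_empty, List.nil_append]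
    rw [hL]
    rfl
  · intro a _; exact PySem.Dict.contains_empty a
  · simp only [List.map_id_fun', id]; exact PySem.List.nodup_dedup (L.map (fun t => t.1))
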